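-- pv_equiv track=rewrite | github.com/dannynrajayuc4548/envswitch | envswitch/inherit.py | resolve_profile
-- ===== SOURCE A (Python) =====
-- class ProfileNotFoundError(Exception):
--     pass
--
-- class CircularInheritanceError(Exception):
--     pass
--
-- def resolve_profile(profile_name: str, profiles: dict, _seen: set = None) -> dict:
--     """Resolve a profile by merging base profile variables with overrides."""
--     if _seen is None:
--         _seen = set()
--     if profile_name in _seen:
--         raise CircularInheritanceError(
--             f"Circular inheritance detected involving '{profile_name}'"
--         )
--     if profile_name not in profiles:
--         raise ProfileNotFoundError(f"Profile '{profile_name}' not found")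
--
--     profile = profiles[profile_name]
--     base_name = profile.get("__base__")
--     own_vars = {k: v for k, v in profile.items() if k != "__base__"}
--
--     if not base_name:
--         return dict(own_vars)
--
--     if base_name not in profiles:
--         raise ProfileNotFoundError(f"Base profile '{base_name}' not found")
--
--     _seen = _seen | {profile_name}
--     base_vars = resolve_profile(base_name, profiles, _seen)
--     base_vars.update(own_vars)
--     return base_vars
-- ===== SOURCE B (Python) =====
-- class ProfileNotFoundError(Exception):
--     pass
--
-- class CircularInheritanceError(Exception):
--     pass
--
-- def resolve_profile(profile_name: str, profiles: dict, _seen: set = None) -> dict: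
--     """Resolve a profile iteratively: walk the __base__ chain, then merge root-first."""
--     seen = set() if _seen is None else set(_seen)
--     chain = []
--     name = profile_name
--     while True:
--         if name in seen:
--             raise CircularInheritanceError(
--                 f"Circular inheritance detected involving '{name}'"
--             )
--         if name not in profiles:
--             raise ProfileNotFoundError(f"Profile '{name}' not found")
--         profile = profiles[name]
--         chain.append(profile)
--         base = profile.get("__base__")
--         if not base:
--             break
--         if base not in profiles:
--             raise ProfileNotFoundError(f"Base profile '{base}' not found")
--         seen.add(name)
--         name = base
--     result = {}
--     for profile in reversed(chain):
--         for k, v in profile.items():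
--             if k != "__base__":
--                 result[k] = v
--     return result
-- ===== Notes on version B (the rewrite author's own statement) =====
-- stated objective: alternative
-- what changed: Replaces the recursive merge-on-unwind resolver with an iterative walk that first collects the whole __base__ chain in a loop and then builds the result in one root-to-derived merge pass over the reversed chain.
import Mathlib
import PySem

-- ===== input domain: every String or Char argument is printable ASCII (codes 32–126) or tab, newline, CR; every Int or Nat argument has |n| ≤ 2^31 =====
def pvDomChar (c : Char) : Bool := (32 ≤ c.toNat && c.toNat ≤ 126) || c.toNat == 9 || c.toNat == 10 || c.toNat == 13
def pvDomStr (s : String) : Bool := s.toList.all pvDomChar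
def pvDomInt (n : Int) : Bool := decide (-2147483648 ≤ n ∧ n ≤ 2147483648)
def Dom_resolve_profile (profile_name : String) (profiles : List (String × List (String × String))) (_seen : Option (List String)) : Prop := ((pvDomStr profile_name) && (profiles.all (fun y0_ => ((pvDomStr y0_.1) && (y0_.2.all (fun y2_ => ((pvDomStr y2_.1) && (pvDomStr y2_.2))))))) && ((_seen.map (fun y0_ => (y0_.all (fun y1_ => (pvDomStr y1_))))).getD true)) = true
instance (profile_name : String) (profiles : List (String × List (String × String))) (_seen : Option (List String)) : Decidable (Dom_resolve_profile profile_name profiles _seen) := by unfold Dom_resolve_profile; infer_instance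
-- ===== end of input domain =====

-- B rewrites the recursive resolver as an iterative walk of the __base__ chain followed by a
-- single root-to-derived merge pass (objective: alternative decomposition; return value only —
-- neither program mutates its arguments observably).

-- termination measure for all three chain-walking recursions: profile keys not yet visited
theorem pvKeys_of_get? {profiles : List (String × List (String × String))} {name : String}
    {profile : List (String × String)}
    (h : (PySem.Dict.mk profiles).get? name = some profile) : (name, profile) ∈ profiles := by
  simp only [PySem.Dict.get?, Option.map_eq_some_iff] at h
  obtain ⟨⟨k, v⟩, hf, hv⟩ := h
  have hm := List.mem_of_find?_eq_some hf
  have hk := List.find?_some hf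
  simp only [beq_iff_eq] at hk
  subst hk; subst hv; exact hm

theorem pvMeasure_lt (keys seen : List String) (name : String)
    (h1 : name ∈ keys) (h2 : name ∉ seen) :
    ((keys.filter (fun k => !(PySem.Set.add seen name).contains k)).length)
      < ((keys.filter (fun k => !(seen.contains k))).length) := by
  have hadd : PySem.Set.add seen name = seen ++ [name] := by
    simp [PySem.Set.add, PySem.Set.contains]
    intro h; exact absurd h h2
  rw [hadd]
  have hf : keys.filter (fun k => !PySem.Set.contains (seen ++ [name]) k)
      = (keys.filter (fun k => !PySem.Set.contains seen k)).filter (fun k => !(name == k)) := by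
    rw [List.filter_filter]
    apply List.filter_congr
    intro a _
    by_cases h : name = a
    · simp [PySem.Set.contains, h]
    · simp [PySem.Set.contains, h, Ne.symm h]
  rw [hf]
  apply List.length_filter_lt_length_iff_exists.mpr
  refine ⟨name, ?_, by simp⟩
  simp [List.mem_filter, PySem.Set.contains, h1, h2]

-- ===== PORT A =====
def resolve_profile (profile_name : String) (profiles : List (String × List (String × String))) (_seen : Option (List String)) : List (String × String) :=
  let seen : List String := _seen.getD []
  if _h0 : profile_name ∈ seen then []          -- raise CircularInheritanceError (outside Pre_)
  else if _hp : ((PySem.Dict.mk profiles).get? profile_name).isNone then []  -- raise ProfileNotFoundError (outside Pre_)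
  else
    let profile := ((PySem.Dict.mk profiles).get? profile_name).getD []  -- profiles[profile_name]
    -- own_vars = {k: v for k, v in profile.items() if k != "__base__"}
    let own_vars := profile.foldl (fun d kv => if kv.1 = "__base__" then d else d.insert kv.1 kv.2) PySem.Dict.empty
    match (PySem.Dict.mk profile).get? "__base__" with
    | none => own_vars.items                    -- not base_name (missing): return dict(own_vars)
    | some b =>
      if b = "" then own_vars.items             -- not base_name (empty string)
      else if ((PySem.Dict.mk profiles).get? b).isNone then []  -- raise ProfileNotFoundError (outside Pre_)
      else
        let base_vars := resolve_profile b profiles (some (PySem.Set.add seen profile_name))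
        ((PySem.Dict.mk base_vars).update own_vars.items).items  -- base_vars.update(own_vars)
termination_by ((profiles.map Prod.fst).filter (fun k => !((_seen.getD []).contains k))).length
decreasing_by
  simp only [Option.getD_some]
  rcases hg : (PySem.Dict.mk profiles).get? profile_name with _ | p
  · rw [hg] at _hp; simp at _hp
  · exact pvMeasure_lt (profiles.map Prod.fst) seen profile_name (List.mem_map_of_mem (pvKeys_of_get? hg)) _h0

-- ===== PORT B =====
-- the while-loop of B: collect the chain of profiles from profile_name down to the root
def pvChain (profiles : List (String × List (String × String))) (seen : List String) (name : String) : List (List (String × String)) :=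
  if _h0 : name ∈ seen then []                  -- raise CircularInheritanceError (outside Pre_)
  else if _hp : ((PySem.Dict.mk profiles).get? name).isNone then []  -- raise ProfileNotFoundError (outside Pre_)
  else
    let profile := ((PySem.Dict.mk profiles).get? name).getD []  -- profiles[name]
    match (PySem.Dict.mk profile).get? "__base__" with
    | none => [profile]                         -- not base: break
    | some b =>
      if b = "" then [profile]                  -- not base: break
      else if ((PySem.Dict.mk profiles).get? b).isNone then []  -- raise ProfileNotFoundError (outside Pre_)
      else profile :: pvChain profiles (PySem.Set.add seen name) b
termination_by ((profiles.map Prod.fst).filter (fun k => !(seen.contains k))).length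
decreasing_by
  rcases hg : (PySem.Dict.mk profiles).get? name with _ | p
  · rw [hg] at _hp; simp at _hp
  · exact pvMeasure_lt (profiles.map Prod.fst) seen name (List.mem_map_of_mem (pvKeys_of_get? hg)) _h0

def resolve_profile_alt (profile_name : String) (profiles : List (String × List (String × String))) (_seen : Option (List String)) : List (String × String) :=
  let seen : List String := match _seen with
    | none => PySem.Set.empty                   -- seen = set()
    | some s => PySem.Set.ofList s              -- seen = set(_seen)
  let chain := pvChain profiles seen profile_name
  -- result = {}; for profile in reversed(chain): insert every non-__base__ item
  (chain.reverse.foldl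
    (fun d profile => profile.foldl (fun d kv => if kv.1 = "__base__" then d else d.insert kv.1 kv.2) d)
    PySem.Dict.empty).items

-- ===== PRECONDITION & SPEC =====
-- the base-pointer map of `profiles`: the (nonempty) __base__ entry of an existing profile
def pvBase (profiles : List (String × List (String × String))) (name : String) : Option String :=
  match (PySem.Dict.mk profiles).get? name with
  | none => none
  | some p =>
    match (PySem.Dict.mk p).get? "__base__" with
    | none => none
    | some b => if b = "" then none else some b

-- the i-th name on the inheritance chain starting at `name`
def pvNth (profiles : List (String × List (String × String))) (name : String) : Nat → Option String
  | 0 => some name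
  | (k+1) =>
    match pvNth profiles name k with
    | none => none
    | some m => pvBase profiles m

-- Pre_ = exactly the inputs on which A returns normally: the inheritance chain from profile_name
-- reaches a profile without a base after k ≤ len(profiles) steps, with every chain member an
-- existing profile, none of them in the initial _seen set (else CircularInheritanceError), and all
-- of them pairwise distinct (else Circular/ProfileNotFoundError is raised); further excluding
-- association lists with a duplicated key inside one profile — those cannot arise from a Python
-- dict, and the two ports' handling of them is accidental.
def Pre_resolve_profile (profile_name : String) (profiles : List (String × List (String × String))) (_seen : Option (List String)) : Prop :=
  (∀ p ∈ profiles, (p.2.map Prod.fst).Nodup) ∧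
  ∃ k < profiles.length + 1,
    (∀ i < k + 1, ((pvNth profiles profile_name i).bind (fun m => (PySem.Dict.mk profiles).get? m)).isSome = true) ∧
    (∀ i < k + 1, (pvNth profiles profile_name i).all (fun m => !((_seen.getD []).contains m)) = true) ∧
    (∀ i < k + 1, ∀ j < i, pvNth profiles profile_name i ≠ pvNth profiles profile_name j) ∧
    pvNth profiles profile_name (k + 1) = none

instance (profile_name : String) (profiles : List (String × List (String × String))) (_seen : Option (List String)) : Decidable (Pre_resolve_profile profile_name profiles _seen) := by unfold Pre_resolve_profile; infer_instance

def pvWitness_resolve_profile : String × (List (String × List (String × String))) × Option (List String) :=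
  ("dev", [("base", [("x", "1"), ("y", "2")]), ("dev", [("__base__", "base"), ("y", "3")])], none)

def Spec_resolve_profile (profile_name : String) (profiles : List (String × List (String × String))) (_seen : Option (List String)) (out : List (String × String)) : Prop := out = resolve_profile_alt profile_name profiles _seen
instance (profile_name : String) (profiles : List (String × List (String × String))) (_seen : Option (List String)) (out : List (String × String)) : Decidable (Spec_resolve_profile profile_name profiles _seen out) := by unfold Spec_resolve_profile; infer_instance

-- ===== CLAIM (what is proved, stated in full; the proofs are below) =====
def Claim_equal_resolve_profile : Prop := ∀ (profile_name : String) (profiles : List (String × List (String × String))) (_seen : Option (List String)), Dom_resolve_profile profile_name profiles _seen → Pre_resolve_profile profile_name profiles _seen → Spec_resolve_profile profile_name profiles _seen (resolve_profile profile_name profiles _seen)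

-- ===== LEMMAS AND PROOFS =====

-- proof device: Boolean success of A's walk (well-founded recursion, used only in proofs)
-- the inheritance chain starting at `name` resolves: no name re-visited, every profile and every
-- named base present in `profiles`
def canResolve (profiles : List (String × List (String × String))) (seen : List String) (name : String) : Bool :=
  if _h0 : name ∈ seen then false
  else if _hp : ((PySem.Dict.mk profiles).get? name).isNone then false
  else
    let profile := ((PySem.Dict.mk profiles).get? name).getD []
    match (PySem.Dict.mk profile).get? "__base__" with
    | none => true
    | some b =>
      if b = "" then true
      else if ((PySem.Dict.mk profiles).get? b).isNone then false
      else canResolve profiles (PySem.Set.add seen name) b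
termination_by ((profiles.map Prod.fst).filter (fun k => !(seen.contains k))).length
decreasing_by
  rcases hg : (PySem.Dict.mk profiles).get? name with _ | p
  · rw [hg] at _hp; simp at _hp
  · exact pvMeasure_lt (profiles.map Prod.fst) seen name (List.mem_map_of_mem (pvKeys_of_get? hg)) _h0


theorem pvNth_shift (profiles : List (String × List (String × String))) (name b : String)
    (hb : pvBase profiles name = some b) :
    ∀ i, pvNth profiles name (i + 1) = pvNth profiles b i := by
  intro i
  induction i with
  | zero => simp [pvNth, hb]
  | succ i ih => rw [pvNth, ih, pvNth]

-- a valid finite chain makes A's walk succeed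
theorem pv_chain_sound (profiles : List (String × List (String × String))) :
    ∀ (k : Nat) (seen : List String) (name : String),
    (∀ i < k + 1, ((pvNth profiles name i).bind (fun m => (PySem.Dict.mk profiles).get? m)).isSome = true) →
    (∀ i < k + 1, (pvNth profiles name i).all (fun m => !(seen.contains m)) = true) →
    (∀ i < k + 1, ∀ j < i, pvNth profiles name i ≠ pvNth profiles name j) →
    pvNth profiles name (k + 1) = none →
    canResolve profiles seen name = true := by
  intro k
  induction k with
  | zero =>
    intro seen name hpres hseen hdist hterm
    have h0 : ((some name).bind (fun m => (PySem.Dict.mk profiles).get? m)).isSome = true := hpres 0 (by omega)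
    have hs0 : (Option.all (fun m => !(seen.contains m)) (some name)) = true := hseen 0 (by omega)
    rcases hg : (PySem.Dict.mk profiles).get? name with _ | p
    · simp [hg] at h0
    · have hnm : name ∉ seen := by
        simp only [Option.all_some] at hs0
        simpa using hs0
      rw [canResolve.eq_def, dif_neg hnm, hg]
      rw [dif_neg (show ¬((some p).isNone = true) by simp)]
      simp only [Option.getD_some]
      have hterm1 : pvBase profiles name = none := by
        simpa [pvNth] using hterm
      rw [pvBase.eq_def, hg] at hterm1
      simp only at hterm1
      rcases hbb : (PySem.Dict.mk p).get? "__base__" with _ | b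
      · simp
      · rw [hbb] at hterm1
        simp only at hterm1 ⊢
        by_cases hb : b = ""
        · rw [if_pos hb]
        · rw [if_neg hb] at hterm1; simp at hterm1
  | succ k ih =>
    intro seen name hpres hseen hdist hterm
    have h0 : ((some name).bind (fun m => (PySem.Dict.mk profiles).get? m)).isSome = true := hpres 0 (by omega)
    have hs0 : (Option.all (fun m => !(seen.contains m)) (some name)) = true := hseen 0 (by omega)
    rcases hg : (PySem.Dict.mk profiles).get? name with _ | p
    · simp [hg] at h0
    · have hnm : name ∉ seen := by
        simp only [Option.all_some] at hs0
        simpa using hs0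
      rw [canResolve.eq_def, dif_neg hnm, hg]
      rw [dif_neg (show ¬((some p).isNone = true) by simp)]
      simp only [Option.getD_some]
      rcases hbb : (PySem.Dict.mk p).get? "__base__" with _ | b
      · simp
      · simp only
        by_cases hb : b = ""
        · rw [if_pos hb]
        · rw [if_neg hb]
          have hbase : pvBase profiles name = some b := by
            rw [pvBase.eq_def, hg]
            simp only
            rw [hbb]
            simp only [if_neg hb]
          have hshift := pvNth_shift profiles name b hbase
          have h1 : ((pvNth profiles name 1).bind (fun m => (PySem.Dict.mk profiles).get? m)).isSome = true :=
            hpres 1 (by omega)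
          have hn1 : pvNth profiles name 1 = some b := by
            have := hshift 0
            simpa [pvNth] using this
          rw [hn1] at h1
          simp only [Option.bind_some] at h1
          rw [if_neg (by simp [Option.isNone_iff_eq_none]; intro hx; rw [hx] at h1; simp at h1)]
          apply ih (PySem.Set.add seen name) b
          · intro i hi
            rw [← hshift i]
            exact hpres (i + 1) (by omega)
          · intro i hi
            have hsi := hseen (i + 1) (by omega)
            have hpi := hpres (i + 1) (by omega)
            rcases hni : pvNth profiles name (i + 1) with _ | m
            · rw [hni] at hpi; simp at hpi
            · rw [hni] at hsi
              have hdm : m ≠ name := by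
                intro hx
                have := hdist (i + 1) (by omega) 0 (by omega)
                rw [hni, hx] at this
                exact this rfl
              have hms : m ∉ seen := by
                simp only [Option.all_some] at hsi
                simpa using hsi
              rw [← hshift i, hni]
              simp only [Option.all_some]
              simp only [Bool.not_eq_eq_eq_not, Bool.not_true]
              have : m ∉ PySem.Set.add seen name := by
                rw [PySem.Set.mem_add]
                rintro (h | h)
                · exact hms h
                · exact hdm h
              simpa using this
          · intro i hi j hj
            rw [← hshift i, ← hshift j]
            exact hdist (i + 1) (by omega) (j + 1) (by omega)
          · rw [← hshift (k + 1)]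
            exact hterm

-- the merge step of B inserts exactly the non-__base__ items
theorem pv_foldl_filter (l : List (String × String)) (d : PySem.Dict String String) :
    l.foldl (fun d kv => if kv.1 = "__base__" then d else d.insert kv.1 kv.2) d
      = d.update (l.filter (fun kv => kv.1 ≠ "__base__")) := by
  induction l generalizing d with
  | nil => rfl
  | cons kv t ih =>
    by_cases h : kv.1 = "__base__" <;>
      simp [List.foldl_cons, h, ih, PySem.Dict.update]

-- updating the empty dict with a nodup-key list reproduces the list
theorem pv_update_empty (l : List (String × String)) (h : (l.map Prod.fst).Nodup) :
    PySem.Dict.empty.update l = PySem.Dict.mk l := by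
  apply PySem.Dict.ext
  have := PySem.Dict.items_foldl_insert_fresh (l := l) (k := Prod.fst) (v := Prod.snd)
    (d := PySem.Dict.empty) (by intro a _; simp [PySem.Dict.contains_empty]) h
  simpa [PySem.Dict.update] using this

-- inserts of distinct keys commute when the first key is already present
theorem pv_insert_comm (e : PySem.Dict String String) (k k₁ : String) (v v₁ : String)
    (hne : k₁ ≠ k) (hc : e.contains k = true) :
    (e.insert k v).insert k₁ v₁ = (e.insert k₁ v₁).insert k v := by
  apply PySem.Dict.ext
  have hc1 : (e.insert k₁ v₁).contains k = true := by
    simp [PySem.Dict.contains_insert, hc]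
  by_cases h1 : e.contains k₁ = true
  · have hck : (e.insert k v).contains k₁ = true := by simp [PySem.Dict.contains_insert, h1]
    rw [PySem.Dict.items_insert_of_contains _ v₁ hck,
        PySem.Dict.items_insert_of_contains _ v hc,
        PySem.Dict.items_insert_of_contains _ v hc1,
        PySem.Dict.items_insert_of_contains _ v₁ h1,
        List.map_map, List.map_map]
    apply List.map_congr_left
    intro p _
    by_cases hp : p.1 = k <;> by_cases hq : p.1 = k₁ <;>
      simp [Function.comp, hp, hq, hne, Ne.symm hne]
  · have h1' : e.contains k₁ = false := by simpa using h1
    have hck : (e.insert k v).contains k₁ = false := by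
      simp [PySem.Dict.contains_insert, h1']
      exact hne
    rw [PySem.Dict.items_insert_of_not_contains _ v₁ hck,
        PySem.Dict.items_insert_of_contains _ v hc,
        PySem.Dict.items_insert_of_contains _ v hc1,
        PySem.Dict.items_insert_of_not_contains _ v₁ h1',
        List.map_append]
    congr 1
    simp
    exact fun h => absurd h hne

-- inserting the same key twice keeps only the last value
theorem pv_insert_insert (e : PySem.Dict String String) (k w v : String) :
    (e.insert k w).insert k v = e.insert k v := by
  apply PySem.Dict.ext
  have hck : (e.insert k w).contains k = true := by simp
  by_cases hc : e.contains k = true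
  · rw [PySem.Dict.items_insert_of_contains _ v hck,
        PySem.Dict.items_insert_of_contains _ w hc,
        PySem.Dict.items_insert_of_contains _ v hc, List.map_map]
    apply List.map_congr_left
    intro p _
    by_cases hp : p.1 = k <;> simp [Function.comp, hp]
  · have hc' : e.contains k = false := by simpa using hc
    have hnk : ∀ p ∈ e.items, ¬(p.1 = k) := by
      intro p hp h
      have : e.contains k = true := by
        simp only [PySem.Dict.contains, List.any_eq_true]
        exact ⟨p, hp, by simp [h]⟩
      simp [this] at hc'
    rw [PySem.Dict.items_insert_of_contains _ v hck,
        PySem.Dict.items_insert_of_not_contains _ w hc',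
        PySem.Dict.items_insert_of_not_contains _ v hc', List.map_append]
    congr 1
    · rw [show e.items = List.map id e.items by simp]
      rw [List.map_map]
      apply List.map_congr_left
      intro p hp
      simp [hnk p hp]
    · simp

theorem pv_insert_update (post : List (String × String)) (e : PySem.Dict String String)
    (k v : String) (hk : k ∉ post.map Prod.fst) (hc : e.contains k = true) :
    (e.insert k v).update post = (e.update post).insert k v := by
  induction post generalizing e with
  | nil => rfl
  | cons p t ih =>
    have hne : p.1 ≠ k := by
      intro h; exact hk (by simp [← h])
    have h1 : k ∉ t.map Prod.fst := fun h => hk (by simp [h])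
    have step : (e.insert k v).insert p.1 p.2 = (e.insert p.1 p.2).insert k v :=
      pv_insert_comm e k p.1 v p.2 hne hc
    have hc' : (e.insert p.1 p.2).contains k = true := by
      simp [PySem.Dict.contains_insert, hc]
    simp only [PySem.Dict.update, List.foldl_cons] at *
    rw [step, ih (e.insert p.1 p.2) h1 hc']

theorem pv_update_insert (M d : PySem.Dict String String) (k v : String)
    (h : M.keys.Nodup) :
    (d.update M.items).insert k v = d.update ((M.insert k v).items) := by
  by_cases hc : M.contains k = true
  · have hkm : k ∈ M.items.map Prod.fst := by
      have := (PySem.Dict.contains_iff_mem_keys (d := M) (k := k)).mp hc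
      simpa [PySem.Dict.keys] using this
    obtain ⟨p, hpmem, hpk⟩ := List.mem_map.mp hkm
    obtain ⟨pre, post, hsplit⟩ := List.append_of_mem hpmem
    have hp : p = (k, p.2) := by
      cases p; simp at hpk; simp [hpk]
    have hkeys : M.keys = pre.map Prod.fst ++ k :: post.map Prod.fst := by
      simp [PySem.Dict.keys, hsplit, hpk]
    rw [hkeys] at h
    have hpre : k ∉ pre.map Prod.fst := by
      intro hx
      exact (List.disjoint_of_nodup_append h) hx (by simp)
    have hpost : k ∉ post.map Prod.fst := by
      have := (List.nodup_append.mp h).2.1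
      rw [List.nodup_cons] at this
      exact this.1
    have hitems : (M.insert k v).items = pre ++ (k, v) :: post := by
      rw [PySem.Dict.items_insert_of_contains _ v hc, hsplit]
      rw [List.map_append, List.map_cons]
      congr 1
      · rw [show pre = List.map id pre by simp, List.map_map]
        apply List.map_congr_left
        intro q hq
        have : q.1 ≠ k := fun hx => hpre (List.mem_map.mpr ⟨q, hq, hx⟩)
        simp [this]
      · congr 1
        · simp [hpk]
        · rw [show post = List.map id post by simp, List.map_map]
          apply List.map_congr_left
          intro q hq
          have : q.1 ≠ k := fun hx => hpost (List.mem_map.mpr ⟨q, hq, hx⟩)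
          simp [this]
    rw [hitems, hsplit]
    have expand : ∀ (mid : String × String),
        d.update (pre ++ mid :: post) = (((d.update pre).insert mid.1 mid.2)).update post := by
      intro mid
      simp [PySem.Dict.update, List.foldl_append]
    rw [expand p, expand (k, v)]
    have hcpre : ((d.update pre).insert p.1 p.2).contains k = true := by
      rw [hp]; simp
    rw [← pv_insert_update post _ k v hpost hcpre]
    congr 1
    rw [hp]
    exact pv_insert_insert _ k p.2 v
  · have hc' : M.contains k = false := by simpa using hc
    rw [PySem.Dict.items_insert_of_not_contains _ v hc']
    simp [PySem.Dict.update, List.foldl_append]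

-- dict-union associativity: d ∪ (M ∪ xs) = (d ∪ M) ∪ xs
theorem pv_update_assoc (xs : List (String × String)) (M d : PySem.Dict String String)
    (h : M.keys.Nodup) :
    (d.update M.items).update xs = d.update ((M.update xs).items) := by
  induction xs generalizing M with
  | nil => rfl
  | cons x t ih =>
    have h1 : (M.insert x.1 x.2).keys.Nodup := PySem.Dict.nodup_keys_insert M x.1 x.2 h
    calc (d.update M.items).update (x :: t)
        = ((d.update M.items).insert x.1 x.2).update t := by
          simp [PySem.Dict.update, List.foldl_cons]
      _ = (d.update ((M.insert x.1 x.2).items)).update t := by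
          rw [pv_update_insert M d x.1 x.2 h]
      _ = d.update (((M.insert x.1 x.2).update t).items) := ih _ h1
      _ = d.update ((M.update (x :: t)).items) := by
          simp [PySem.Dict.update, List.foldl_cons]

-- main invariant: folding B's merge step over the reversed chain = updating with A's result,
-- and A's result has nodup keys
theorem pv_main (profiles : List (String × List (String × String)))
    (hnd : ∀ p ∈ profiles, (p.2.map Prod.fst).Nodup) :
    ∀ (n : Nat) (name : String) (s1 : Option (List String)) (seen1 seen2 : List String)
      (d : PySem.Dict String String),
    ((profiles.map Prod.fst).filter (fun k => !(seen1.contains k))).length ≤ n →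
    seen1 = s1.getD [] →
    (∀ x, x ∈ seen1 ↔ x ∈ seen2) →
    canResolve profiles seen1 name = true →
    ((pvChain profiles seen2 name).reverse.foldl
        (fun d profile => profile.foldl (fun d kv => if kv.1 = "__base__" then d else d.insert kv.1 kv.2) d) d
      = d.update (resolve_profile name profiles s1))
    ∧ ((resolve_profile name profiles s1).map Prod.fst).Nodup := by
  intro n
  induction n using Nat.strong_induction_on with
  | _ n IH =>
    intro name s1 seen1 seen2 d hn hseen hs hcr
    rw [canResolve.eq_def] at hcr
    rw [resolve_profile.eq_def, pvChain.eq_def]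
    simp only [← hseen] at *
    by_cases h0 : name ∈ seen1
    · rw [dif_pos h0] at hcr; exact absurd hcr (by simp)
    · have h0' : name ∉ seen2 := fun hx => h0 ((hs name).mpr hx)
      rw [dif_neg h0] at hcr
      rw [dif_neg h0, dif_neg h0']
      cases hget : (PySem.Dict.mk profiles).get? name with
      | none => rw [hget] at hcr; simp at hcr
      | some profile =>
        rw [hget] at hcr
        rw [dif_neg (show ¬((some profile).isNone = true) by simp)] at hcr
        rw [dif_neg (show ¬((some profile).isNone = true) by simp),
            dif_neg (show ¬((some profile).isNone = true) by simp)]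
        simp only [Option.getD_some] at hcr ⊢
        have hmemp : (name, profile) ∈ profiles := pvKeys_of_get? hget
        have hndp : (profile.map Prod.fst).Nodup := hnd _ hmemp
        have hfp : ((profile.filter (fun kv => kv.1 ≠ "__base__")).map Prod.fst).Nodup :=
          List.Nodup.sublist (List.Sublist.map Prod.fst List.filter_sublist) hndp
        have hown : profile.foldl (fun d kv => if kv.1 = "__base__" then d else d.insert kv.1 kv.2) PySem.Dict.empty
            = PySem.Dict.mk (profile.filter (fun kv => kv.1 ≠ "__base__")) := by
          rw [pv_foldl_filter, pv_update_empty _ hfp]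
        cases hbase : (PySem.Dict.mk profile).get? "__base__" with
        | none =>
          simp only [List.reverse_cons, List.reverse_nil, List.nil_append, List.foldl_cons,
            List.foldl_nil, hown]
          exact ⟨pv_foldl_filter profile d, hfp⟩
        | some b =>
          rw [hbase] at hcr
          simp only [] at hcr ⊢
          by_cases hb : b = ""
          · rw [if_pos hb] at hcr ⊢
            rw [if_pos hb]
            simp only [List.reverse_cons, List.reverse_nil, List.nil_append, List.foldl_cons,
              List.foldl_nil, hown]
            exact ⟨pv_foldl_filter profile d, hfp⟩
          · rw [if_neg hb] at hcr ⊢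
            rw [if_neg hb]
            by_cases hgb : ((PySem.Dict.mk profiles).get? b).isNone = true
            · rw [if_pos hgb] at hcr; simp at hcr
            · rw [if_neg hgb] at hcr
              rw [if_neg hgb, if_neg hgb]
              have hkname : name ∈ profiles.map Prod.fst := List.mem_map_of_mem hmemp
              have hlt := pvMeasure_lt (profiles.map Prod.fst) seen1 name hkname h0
              have hs' : ∀ x, x ∈ PySem.Set.add seen1 name ↔ x ∈ PySem.Set.add seen2 name := by
                intro x
                rw [PySem.Set.mem_add, PySem.Set.mem_add]
                constructor
                · rintro (hx | rfl)
                  · exact Or.inl ((hs x).mp hx)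
                  · exact Or.inr rfl
                · rintro (hx | rfl)
                  · exact Or.inl ((hs x).mpr hx)
                  · exact Or.inr rfl
              have hmle : ((profiles.map Prod.fst).filter
                  (fun k => !((PySem.Set.add seen1 name).contains k))).length < n :=
                lt_of_lt_of_le hlt hn
              obtain ⟨ihA, ihN⟩ := IH _ hmle b (some (PySem.Set.add seen1 name))
                (PySem.Set.add seen1 name) (PySem.Set.add seen2 name) d
                le_rfl (by simp) hs' hcr
              have hMnd : (PySem.Dict.mk (resolve_profile b profiles (some (PySem.Set.add seen1 name)))).keys.Nodup := by
                simpa [PySem.Dict.keys] using ihN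
              constructor
              · rw [List.reverse_cons, List.foldl_append, List.foldl_cons, List.foldl_nil]
                rw [ihA, hown]
                have := pv_update_assoc (profile.filter (fun kv => kv.1 ≠ "__base__"))
                  (PySem.Dict.mk (resolve_profile b profiles (some (PySem.Set.add seen1 name)))) d hMnd
                rw [pv_foldl_filter]
                exact this
              · rw [hown]
                have := PySem.Dict.nodup_keys_update _ (profile.filter (fun kv => kv.1 ≠ "__base__")) hMnd
                simpa [PySem.Dict.keys] using this

-- ===== VERDICT (by name: the statement is the Claim_ definition above) =====
theorem resolve_profile_spec : Claim_equal_resolve_profile := by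
  unfold Claim_equal_resolve_profile
  intro profile_name profiles _seen _hdom hpre
  obtain ⟨hnd, k, _hk, hpres, hseenc, hdist, hterm⟩ := hpre
  have hcr : canResolve profiles (_seen.getD []) profile_name = true :=
    pv_chain_sound profiles k (_seen.getD []) profile_name hpres hseenc hdist hterm
  unfold Spec_resolve_profile
  have hs : ∀ x, x ∈ _seen.getD [] ↔
      x ∈ (match _seen with | none => (PySem.Set.empty : List String) | some s => PySem.Set.ofList s) := by
    intro x
    cases _seen with
    | none => simp [PySem.Set.empty]
    | some s => exact (Option.getD_some ▸ (PySem.Set.mem_ofList s x).symm)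
  obtain ⟨hmain, hN⟩ := pv_main profiles hnd
    (((profiles.map Prod.fst).filter (fun k => !((_seen.getD []).contains k))).length)
    profile_name _seen (_seen.getD [])
    (match _seen with | none => PySem.Set.empty | some s => PySem.Set.ofList s)
    PySem.Dict.empty le_rfl rfl hs hcr
  show resolve_profile profile_name profiles _seen = resolve_profile_alt profile_name profiles _seen
  show resolve_profile profile_name profiles _seen =
    (List.foldl
        (fun d profile => List.foldl (fun d kv => if kv.1 = "__base__" then d else d.insert kv.1 kv.2) d profile)
        PySem.Dict.empty
        (pvChain profiles
          (match _seen with | none => PySem.Set.empty | some s => PySem.Set.ofList s)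
          profile_name).reverse).items
  rw [hmain, pv_update_empty _ hN]
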